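-- pv_equiv track=rewrite | github.com/wrode/auctionVision | backend/comparables.py | _types_related
-- ===== SOURCE A (Python) =====
-- def _types_related(type_a: str, type_b: str) -> bool:
--     """Check if two object types are in the same family."""
--     families = [
--         {"chair", "dining chair", "armchair", "office chair", "lounge chair", "rocking chair", "stool", "barstool"},
--         {"table", "dining table", "coffee table", "side table", "desk", "nesting tables", "dining table set with extension leaves"},
--         {"cabinet", "sideboard", "chest of drawers", "high sideboard", "shelf", "wall-mounted shelving system", "wall shelving system", "shelving"},
--         {"sofa", "seating set", "daybed", "bench"},
--     ]
--     for family in families: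
--         if type_a in family and type_b in family:
--             return True
--     return False
-- ===== SOURCE B (Python) =====
-- # Flat literal index: each type maps straight to its family id; a query is two
-- # O(1) lookups with a None guard instead of a per-family membership scan.
-- _FAMILY_INDEX = {
--     "chair": 0, "dining chair": 0, "armchair": 0, "office chair": 0,
--     "lounge chair": 0, "rocking chair": 0, "stool": 0, "barstool": 0,
--     "table": 1, "dining table": 1, "coffee table": 1, "side table": 1,
--     "desk": 1, "nesting tables": 1, "dining table set with extension leaves": 1,
--     "cabinet": 2, "sideboard": 2, "chest of drawers": 2, "high sideboard": 2,
--     "shelf": 2, "wall-mounted shelving system": 2, "wall shelving system": 2, "shelving": 2,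
--     "sofa": 3, "seating set": 3, "daybed": 3, "bench": 3,
-- }
--
--
-- def _types_related(type_a: str, type_b: str) -> bool:
--     """Check if two object types are in the same family."""
--     fa = _FAMILY_INDEX.get(type_a)
--     return fa is not None and fa == _FAMILY_INDEX.get(type_b)
-- ===== Notes on version B (the rewrite author's own statement) =====
-- stated objective: idiomatic
-- what changed: B replaces A's per-call list of family sets and the per-family membership loop by a flat literal dict mapping each type string to its family id; the answer is two constant-time lookups compared under a None guard.
import Mathlib
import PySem

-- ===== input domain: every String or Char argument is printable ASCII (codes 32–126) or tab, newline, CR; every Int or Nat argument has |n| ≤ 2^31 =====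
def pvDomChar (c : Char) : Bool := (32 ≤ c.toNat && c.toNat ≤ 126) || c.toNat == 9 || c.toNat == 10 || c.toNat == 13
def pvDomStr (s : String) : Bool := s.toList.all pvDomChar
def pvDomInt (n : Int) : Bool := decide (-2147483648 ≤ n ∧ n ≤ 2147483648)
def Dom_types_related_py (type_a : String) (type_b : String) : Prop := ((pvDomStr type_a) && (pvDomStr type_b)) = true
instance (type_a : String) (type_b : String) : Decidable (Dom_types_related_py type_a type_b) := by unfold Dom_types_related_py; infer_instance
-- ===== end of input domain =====

-- B replaces A's per-family membership loop by a flat literal type -> family-id dict,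
-- answered by two lookups compared under a None guard (idiomatic).

-- ===== PORT A =====
-- the four set literals of A's 'families' list (elements distinct, so Set.ofList keeps them as written)
def pvFamiliesA : List (PySem.Set String) :=
  [PySem.Set.ofList ["chair", "dining chair", "armchair", "office chair", "lounge chair", "rocking chair", "stool", "barstool"],
   PySem.Set.ofList ["table", "dining table", "coffee table", "side table", "desk", "nesting tables", "dining table set with extension leaves"],
   PySem.Set.ofList ["cabinet", "sideboard", "chest of drawers", "high sideboard", "shelf", "wall-mounted shelving system", "wall shelving system", "shelving"],
   PySem.Set.ofList ["sofa", "seating set", "daybed", "bench"]]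

-- 'for family in families: if type_a in family and type_b in family: return True' / 'return False'
def types_related_py (type_a : String) (type_b : String) : Bool :=
  pvFamiliesA.any (fun family => PySem.Set.contains family type_a && PySem.Set.contains family type_b)

-- ===== PORT B =====
-- the literal dict _FAMILY_INDEX
def pvFamilyIndex : PySem.Dict String Int :=
  PySem.Dict.ofList
    [("chair", 0), ("dining chair", 0), ("armchair", 0), ("office chair", 0),
     ("lounge chair", 0), ("rocking chair", 0), ("stool", 0), ("barstool", 0),
     ("table", 1), ("dining table", 1), ("coffee table", 1), ("side table", 1),
     ("desk", 1), ("nesting tables", 1), ("dining table set with extension leaves", 1),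
     ("cabinet", 2), ("sideboard", 2), ("chest of drawers", 2), ("high sideboard", 2),
     ("shelf", 2), ("wall-mounted shelving system", 2), ("wall shelving system", 2), ("shelving", 2),
     ("sofa", 3), ("seating set", 3), ("daybed", 3), ("bench", 3)]

-- fa = _FAMILY_INDEX.get(type_a); return fa is not None and fa == _FAMILY_INDEX.get(type_b)
def types_related_py_alt (type_a : String) (type_b : String) : Bool :=
  match PySem.Dict.get? pvFamilyIndex type_a with
  | none => false
  | some fa => PySem.Dict.get? pvFamilyIndex type_b == some fa

-- ===== PRECONDITION & SPEC =====
def Spec_types_related_py (type_a : String) (type_b : String) (out : Bool) : Prop := out = types_related_py_alt type_a type_b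
instance (type_a : String) (type_b : String) (out : Bool) : Decidable (Spec_types_related_py type_a type_b out) := by unfold Spec_types_related_py; infer_instance

-- ===== CLAIM (what is proved, stated in full; the proofs are below) =====
def Claim_equal_types_related_py : Prop := ∀ (type_a : String) (type_b : String), Dom_types_related_py type_a type_b → Spec_types_related_py type_a type_b (types_related_py type_a type_b)

-- ===== LEMMAS AND PROOFS =====
-- all type strings, in family order
def pvAllTypes : List String := pvFamiliesA.flatten

-- agreement on every pair of known type strings, checked in one kernel evaluation
set_option maxRecDepth 40000 in
theorem pvAllPairs :
    (pvAllTypes.all fun a => pvAllTypes.all fun b =>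
      types_related_py a b == types_related_py_alt a b) = true := by decide

theorem pvGet?_none (a : String) (h : a ∉ pvAllTypes) :
    PySem.Dict.get? pvFamilyIndex a = none := by
  rw [PySem.Dict.get?_eq_none_iff_not_mem_keys]
  intro hk
  apply h
  have hkeys : PySem.Dict.keys pvFamilyIndex = pvAllTypes := by decide
  rwa [hkeys] at hk

theorem pvContains_none (a : String) (h : a ∉ pvAllTypes) :
    ∀ f ∈ pvFamiliesA, PySem.Set.contains f a = false := by
  intro f hf
  fin_cases hf <;> simp_all [pvAllTypes, pvFamiliesA, PySem.Set.contains, PySem.Set.ofList]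

theorem pvMain (a b : String) : types_related_py a b = types_related_py_alt a b := by
  by_cases ha : a ∈ pvAllTypes
  · by_cases hb : b ∈ pvAllTypes
    · have h := pvAllPairs
      simp only [List.all_eq_true, beq_iff_eq] at h
      exact h a ha b hb
    · have hc := pvContains_none b hb
      have hg := pvGet?_none b hb
      unfold types_related_py types_related_py_alt
      rw [hg]
      cases hga : PySem.Dict.get? pvFamilyIndex a with
      | none => simp [pvFamiliesA] at hc ⊢; simp [hc]
      | some fa => simp [pvFamiliesA] at hc ⊢; simp [hc]
  · have hc := pvContains_none a ha
    have hg := pvGet?_none a ha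
    unfold types_related_py types_related_py_alt
    rw [hg]
    simp [pvFamiliesA] at hc ⊢
    simp [hc]

-- ===== VERDICT (by name: the statement is the Claim_ definition above) =====
theorem types_related_py_spec : Claim_equal_types_related_py := by
  intro a b _
  exact pvMain a b
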